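-- pv_equiv track=rewrite | github.com/blazegraph/blazegraph-python | pymantic/primitives.py | to_curie
-- ===== SOURCE A (Python) =====
-- def to_curie(uri, namespaces, seperator=":", explicit=False):
--     """Converts a URI to a CURIE using the prefixes defined in namespaces. If
--     there is no matching prefix, return the URI unchanged.
--
--     namespaces - a dictionary of prefix -> namespace mappings.
--
--     separator - the character to use as the separator between the prefix and
--                 the local name.
--
--     explicit - if True and the URI can be abbreviated, wrap the abbreviated
--                form in []s to indicate that it is definitely a CURIE."""
--     matches = []
--     for prefix, namespace in namespaces.items():
--         if uri.startswith(namespace):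
--             matches.append((prefix, namespace))
--     if len(matches) > 0:
--         prefix, namespace = sorted(matches, key=lambda pair: -len(pair[1]))[0]
--         if explicit:
--             return '[' + uri.replace(namespace, prefix + seperator) + ']'
--         else:
--             return uri.replace(namespace, prefix + seperator)
--     return uri
-- ===== SOURCE B (Python) =====
-- def to_curie(uri, namespaces, seperator=":", explicit=False):
--     """Converts a URI to a CURIE using the prefixes defined in namespaces.
--     Single pass keeping the best (longest, first-seen on ties) matching
--     namespace instead of collecting all matches and sorting them."""
--     best_prefix = None
--     best_namespace = None
--     for prefix, namespace in namespaces.items():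
--         if uri.startswith(namespace) and (
--                 best_namespace is None or len(namespace) > len(best_namespace)):
--             best_prefix, best_namespace = prefix, namespace
--     if best_namespace is None:
--         return uri
--     curie = uri.replace(best_namespace, best_prefix + seperator)
--     return '[' + curie + ']' if explicit else curie
-- ===== Notes on version B (the rewrite author's own statement) =====
-- stated objective: simpler
-- what changed: Replaces the collect-all-matches-then-stable-sort-and-take-head structure with a single pass that keeps a running best match, using strict '>' so ties keep the first-iterated namespace exactly as the stable sort does.
import Mathlib
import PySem

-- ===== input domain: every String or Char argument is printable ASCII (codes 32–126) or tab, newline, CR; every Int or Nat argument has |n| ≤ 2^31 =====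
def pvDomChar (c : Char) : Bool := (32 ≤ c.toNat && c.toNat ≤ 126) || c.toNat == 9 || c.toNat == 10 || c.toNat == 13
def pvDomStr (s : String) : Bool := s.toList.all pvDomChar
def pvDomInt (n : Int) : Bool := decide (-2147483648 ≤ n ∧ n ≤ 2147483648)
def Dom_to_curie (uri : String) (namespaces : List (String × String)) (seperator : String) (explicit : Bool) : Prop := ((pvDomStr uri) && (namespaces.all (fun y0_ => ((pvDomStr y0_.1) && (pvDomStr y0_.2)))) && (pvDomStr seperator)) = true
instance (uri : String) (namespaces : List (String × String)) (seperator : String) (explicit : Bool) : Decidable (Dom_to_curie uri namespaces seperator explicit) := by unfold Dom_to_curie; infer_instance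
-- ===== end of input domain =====

-- B replaces A's collect-matches / stable-sort / take-head structure with a single
-- running-best pass (strict '>' keeps the first-iterated namespace on ties); objective: simpler.


-- ===== PORT A =====
-- literal port of A: build the list of matches, stable-sort it by -len(namespace), take the head
def to_curie (uri : String) (namespaces : List (String × String)) (seperator : String) (explicit : Bool) : String :=
  let ms := (PySem.Dict.ofList namespaces).items.foldl
    (fun acc pn => if PySem.Str.startswith uri pn.2 then acc ++ [pn] else acc) []
  if ms.length > 0 then
    match PySem.List.sorted ms (fun pair => -(PySem.Str.len pair.2)) false with
    | (pfx, ns) :: _ =>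
      if explicit then "[" ++ PySem.Str.replace uri ns (pfx ++ seperator) ++ "]"
      else PySem.Str.replace uri ns (pfx ++ seperator)
    | [] => uri  -- unreachable: sorted of a nonempty list is nonempty
  else uri

-- ===== PORT B =====
-- literal port of B: one pass keeping the best (longest, first on ties) matching pair
def to_curie_alt (uri : String) (namespaces : List (String × String)) (seperator : String) (explicit : Bool) : String :=
  let best := (PySem.Dict.ofList namespaces).items.foldl
    (fun (best : Option (String × String)) pn =>
      if PySem.Str.startswith uri pn.2 &&
         (match best with
          | none => true
          | some b => decide (PySem.Str.len b.2 < PySem.Str.len pn.2))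
      then some pn else best) none
  match best with
  | none => uri
  | some (pfx, ns) =>
    let curie := PySem.Str.replace uri ns (pfx ++ seperator)
    if explicit then "[" ++ curie ++ "]" else curie

-- ===== PRECONDITION & SPEC =====
def Spec_to_curie (uri : String) (namespaces : List (String × String)) (seperator : String) (explicit : Bool) (out : String) : Prop := out = to_curie_alt uri namespaces seperator explicit
instance (uri : String) (namespaces : List (String × String)) (seperator : String) (explicit : Bool) (out : String) : Decidable (Spec_to_curie uri namespaces seperator explicit out) := by unfold Spec_to_curie; infer_instance

-- ===== CLAIM (what is proved, stated in full; the proofs are below) =====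
def Claim_equal_to_curie : Prop := ∀ (uri : String) (namespaces : List (String × String)) (seperator : String) (explicit : Bool), Dom_to_curie uri namespaces seperator explicit → Spec_to_curie uri namespaces seperator explicit (to_curie uri namespaces seperator explicit)

-- ===== LEMMAS AND PROOFS =====

-- the running-max step both reductions converge to
def pvBestStep (b x : String × String) : String × String :=
  if PySem.Str.len b.2 < PySem.Str.len x.2 then x else b

-- head of insertion with 'before a b = (key a < key b)'
theorem pv_insertBy_head (key : (String × String) → Int) (x : String × String)
    (acc : List (String × String)) :
    (PySem.List.insertBy (fun a b => decide (key a < key b)) x acc).head? =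
      some (match acc.head? with
            | none => x
            | some y => if key x < key y then x else y) := by
  cases acc with
  | nil => simp [PySem.List.insertBy]
  | cons y ys =>
    simp only [PySem.List.insertBy, List.head?_cons]
    by_cases h : key x < key y <;> simp [h]

-- head of the insertion-sort fold = running strict-best fold (first extremal kept)
theorem pv_sort_fold_head (key : (String × String) → Int) :
    ∀ (ms : List (String × String)) (acc : List (String × String)) (y : String × String),
    acc.head? = some y →
    ((ms.foldl (fun acc x => PySem.List.insertBy (fun a b => decide (key a < key b)) x acc) acc).head?) =
      some (ms.foldl (fun b x => if key x < key b then x else b) y) := by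
  intro ms
  induction ms with
  | nil => intro acc y h; simpa using h
  | cons x ms ih =>
    intro acc y h
    simp only [List.foldl_cons]
    apply ih
    rw [pv_insertBy_head, h]

-- B's fold over all items equals its fold over the matching items only
theorem pv_foldB_filter (uri : String) :
    ∀ (items : List (String × String)) (st : Option (String × String)),
    items.foldl
      (fun (best : Option (String × String)) pn =>
        if PySem.Str.startswith uri pn.2 &&
           (match best with
            | none => true
            | some b => decide (PySem.Str.len b.2 < PySem.Str.len pn.2))
        then some pn else best) st =
    (items.filter (fun pn => PySem.Str.startswith uri pn.2)).foldl
      (fun (best : Option (String × String)) pn =>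
        if (match best with
            | none => true
            | some b => decide (PySem.Str.len b.2 < PySem.Str.len pn.2))
        then some pn else best) st := by
  intro items
  induction items with
  | nil => intro st; rfl
  | cons pn items ih =>
    intro st
    simp only [List.foldl_cons, List.filter_cons]
    cases hsw : PySem.Str.startswith uri pn.2 with
    | false =>
      simp only [Bool.false_and]
      rw [if_neg (by simp)]
      exact ih st
    | true =>
      simp only [Bool.true_and]
      exact ih _

-- the Option-state running-best fold from 'some b' computes a plain running-best fold
theorem pv_foldB_some :
    ∀ (ms : List (String × String)) (b : String × String),
    ms.foldl
      (fun (best : Option (String × String)) pn =>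
        if (match best with
            | none => true
            | some b => decide (PySem.Str.len b.2 < PySem.Str.len pn.2))
        then some pn else best) (some b) =
      some (ms.foldl pvBestStep b) := by
  intro ms
  induction ms with
  | nil => intro b; rfl
  | cons x ms ih =>
    intro b
    simp only [List.foldl_cons, pvBestStep]
    by_cases h : PySem.Str.len b.2 < PySem.Str.len x.2
    · rw [if_pos (by simpa using h), if_pos h]; exact ih x
    · rw [if_neg (by simpa using h), if_neg h]; exact ih b

-- the two running-best folds are the same function of the match list
theorem pv_fold_eq (ms : List (String × String)) (b : String × String) :
    ms.foldl (fun b x => if (fun p => -(PySem.Str.len p.2)) x < (fun p => -(PySem.Str.len p.2)) b then x else b) b =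
      ms.foldl pvBestStep b := by
  have hfun : (fun (b x : String × String) =>
      if (fun p => -(PySem.Str.len p.2)) x < (fun p => -(PySem.Str.len p.2)) b then x else b) = pvBestStep := by
    funext b x
    simp only [pvBestStep, neg_lt_neg_iff]
  rw [hfun]

-- ===== VERDICT (by name: the statement is the Claim_ definition above) =====
theorem to_curie_spec : Claim_equal_to_curie := by
  intro uri namespaces seperator explicit _
  unfold Spec_to_curie to_curie to_curie_alt
  simp only [PySem.List.foldl_append_if_eq_filter, List.nil_append, pv_foldB_filter uri]
  cases hf : (PySem.Dict.ofList namespaces).items.filter (fun pn => PySem.Str.startswith uri pn.2) with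
  | nil => simp
  | cons m ms =>
    rw [List.foldl_cons,
        show (if (match (none : Option (String × String)) with
              | none => true
              | some b => decide (PySem.Str.len b.2 < PySem.Str.len m.2)) = true
          then some m else (none : Option (String × String))) = some m from rfl,
        pv_foldB_some]
    have hhead : (PySem.List.sorted (m :: ms) (fun pair => -(PySem.Str.len pair.2)) false).head? =
        some (ms.foldl pvBestStep m) := by
      rw [PySem.List.sorted_eq_foldl_insertBy (m :: ms) (fun pair => -(PySem.Str.len pair.2))]
      simp only [List.foldl_cons]
      rw [pv_sort_fold_head (fun pair => -(PySem.Str.len pair.2)) ms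
            (PySem.List.insertBy _ m []) m (by simp [PySem.List.insertBy])]
      rw [pv_fold_eq]
    cases hsort : PySem.List.sorted (m :: ms) (fun pair => -(PySem.Str.len pair.2)) false with
    | nil => rw [hsort] at hhead; simp at hhead
    | cons best tail =>
      rw [hsort] at hhead
      simp only [List.head?_cons, Option.some.injEq] at hhead
      subst hhead
      cases hbest : List.foldl pvBestStep m ms with
      | mk pfx ns =>
        simp
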